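-- pv_equiv track=rewrite | github.com/anuar2k/ASD-2020 | 07/02off.py | DFS
-- ===== SOURCE A (Python) =====
-- class Vertex:
--     def __init__(self):
--         self.visited = False
--         self.parent = None
--         self.entry = None
--         self.process = None
--
-- def DFSVisit(G, vertices, time, u):
--     time += 1
--     vertices[u].visited = True
--     vertices[u].entry = time
--
--     # reprezentacja macierzy pozwala nam uzyskać sąsiadów przez proste odwołanie do G[u]
--     for v in G[u]:
--         if not vertices[v].visited:
--             vertices[v].parent = u
--             # przypisujemy time, gdyż nie mamy globalnego licznika
--             time = DFSVisit(G, vertices, time, v)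
--
--     time += 1
--     vertices[u].process = time
--     # zwracamy czas, jaki upłynął w danym wywołaniu rekurencyjnym
--     return time
--
-- def DFS(G):
--     n = len(G)
--     time = 0
--     vertices = []
--     # tworzymy listę obiektów zawierających informacje o wierzchołkach
--     for _ in range(n):
--         vertices.append(Vertex())
--
--     for v in range(n):
--         if not vertices[v].visited:
--             # przypisujemy time, gdyż nie mamy globalnego licznika
--             time = DFSVisit(G, vertices, time, v)
--
--     # ponieważ informacje o każdym z wierzchołków mamy w tablicy z bezpośrednim dostępem, wystarczy ją przejśc liniowo
--     result = []
--     for vertex in vertices: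
--         result.append(vertex.parent)
--     return result
-- ===== SOURCE B (Python) =====
-- def DFS(G):
--     n = len(G)
--     visited = [False] * n
--     parent = [None] * n
--     for r in range(n):
--         if not visited[r]:
--             visited[r] = True
--             stack = [(r, 0)]
--             while stack:
--                 u, i = stack[-1]
--                 row = G[u]
--                 if i < len(row):
--                     stack[-1] = (u, i + 1)
--                     v = row[i]
--                     if not visited[v]:
--                         visited[v] = True
--                         parent[v] = u
--                         stack.append((v, 0))
--                 else:
--                     stack.pop()
--     return parent
-- ===== Notes on version B (the rewrite author's own statement) =====
-- stated objective: alternative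
-- what changed: Recursive DFSVisit with entry/process time bookkeeping is replaced by an iterative DFS using an explicit stack of (vertex, neighbour-cursor) frames over plain visited/parent arrays; only the parent array is kept.
import Mathlib
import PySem

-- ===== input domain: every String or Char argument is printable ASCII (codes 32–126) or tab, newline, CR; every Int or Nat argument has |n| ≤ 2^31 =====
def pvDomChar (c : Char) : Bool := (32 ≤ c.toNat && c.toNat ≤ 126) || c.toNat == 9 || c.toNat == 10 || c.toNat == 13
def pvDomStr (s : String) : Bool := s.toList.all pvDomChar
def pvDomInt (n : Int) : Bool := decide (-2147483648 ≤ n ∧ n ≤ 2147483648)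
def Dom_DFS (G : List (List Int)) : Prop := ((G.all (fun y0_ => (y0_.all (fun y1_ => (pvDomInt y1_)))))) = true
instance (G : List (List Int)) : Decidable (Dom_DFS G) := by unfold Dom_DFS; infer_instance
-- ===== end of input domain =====

-- B replaces A's recursive DFSVisit (with dead entry/process-time bookkeeping) by an iterative DFS over an
-- explicit stack of (vertex, neighbour-cursor) frames maintaining just visited/parent arrays (objective: alternative).

-- ===== PORT A =====

-- Python list index with negative wraparound: vertices[u] / G[u].  Exact for -n ≤ u < n; outside that
-- range Python raises IndexError (excluded by Pre_DFS).
def pvNorm (n : Nat) (u : Int) : Nat := (if u < 0 then u + n else u).toNat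

-- the Vertex record of A (all four fields kept, as in the Python)
structure PVVertex where
  visited : Bool
  parent : Option Int
  entry : Option Int
  process : Option Int
deriving DecidableEq, Repr

def pvDefaultV : PVVertex := ⟨false, none, none, none⟩

-- DFSVisit of A.  The for-loop over G[u] is dfsRowA (structural recursion on the neighbour list,
-- with the recursive DFSVisit call passed as `visit`); the Nat argument of dfsVisitA is pure recursion
-- fuel (a totality guard): DFS below passes n, and the recursion depth never exceeds n since every
-- nested call enters a vertex that was unvisited and is marked on entry.  Mutation of vertices[j]
-- becomes List.set at j.
def dfsRowA (visit : List PVVertex → Int → Int → List PVVertex × Int) (u : Int) :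
    List PVVertex → Int → List Int → List PVVertex × Int
  | vs, time, [] => (vs, time)
  | vs, time, v :: l =>
    if (vs.getD (pvNorm vs.length v) pvDefaultV).visited then
      dfsRowA visit u vs time l
    else
      let r := visit
        (vs.set (pvNorm vs.length v)
          ⟨(vs.getD (pvNorm vs.length v) pvDefaultV).visited, some u,
           (vs.getD (pvNorm vs.length v) pvDefaultV).entry,
           (vs.getD (pvNorm vs.length v) pvDefaultV).process⟩)   -- vertices[v].parent = u
        time v
      dfsRowA visit u r.1 r.2 l

def dfsVisitA (G : List (List Int)) : Nat → List PVVertex → Int → Int → List PVVertex × Int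
  | 0, vs, time, _ => (vs, time)
  | fuel+1, vs, time, u =>
    let t1 := time + 1
    let j := pvNorm vs.length u
    let x := vs.getD j pvDefaultV
    let vs1 := vs.set j ⟨true, x.parent, some t1, x.process⟩   -- vertices[u].visited = True; .entry = time
    let r := dfsRowA (fun vs' t' v => dfsVisitA G fuel vs' t' v) u vs1 t1 (G.getD (pvNorm G.length u) [])
    let t3 := r.2 + 1
    let j2 := pvNorm r.1.length u
    let y := r.1.getD j2 pvDefaultV
    (r.1.set j2 ⟨y.visited, y.parent, y.entry, some t3⟩, t3)   -- vertices[u].process = time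

def DFS (G : List (List Int)) : List (Option Int) :=
  let n := G.length
  let vertices := List.replicate n pvDefaultV
  let st := (List.range n).foldl
    (fun (st : List PVVertex × Int) v =>
      if (st.1.getD v pvDefaultV).visited then st
      else dfsVisitA G n st.1 st.2 (v : Int))
    (vertices, 0)
  st.1.map (·.parent)

-- ===== PORT B =====

-- the while-loop of B: peek the top frame, advance its cursor past visited neighbours, push new
-- frames.  The Nat argument is pure iteration fuel (a totality guard): DFS_alt passes
-- n + (total number of neighbour entries) + 1, which provably exceeds the number of loop iterations.
-- The conjunct j < vis.length in the branch test is also a totality guard: Python raises IndexError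
-- exactly when it fails (outside Pre_DFS); inside Pre_DFS it always holds.
def dfsLoopB (G : List (List Int)) : Nat → List (Int × Nat) → List Bool → List (Option Int) →
    List Bool × List (Option Int)
  | 0, _, vis, par => (vis, par)
  | fuel+1, stk, vis, par =>
    match stk with
    | [] => (vis, par)
    | (u, i) :: stk =>
      if i < (G.getD (pvNorm G.length u) []).length then
        if (pvNorm vis.length ((G.getD (pvNorm G.length u) []).getD i 0) < vis.length ∧
            vis.getD (pvNorm vis.length ((G.getD (pvNorm G.length u) []).getD i 0)) false = false :
            Prop) then
          dfsLoopB G fuel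
            (((G.getD (pvNorm G.length u) []).getD i 0, 0) :: (u, i+1) :: stk)
            (vis.set (pvNorm vis.length ((G.getD (pvNorm G.length u) []).getD i 0)) true)
            (par.set (pvNorm par.length ((G.getD (pvNorm G.length u) []).getD i 0)) (some u))
        else
          dfsLoopB G fuel ((u, i+1) :: stk) vis par
      else
        dfsLoopB G fuel stk vis par

def DFS_alt (G : List (List Int)) : List (Option Int) :=
  let n := G.length
  let st := (List.range n).foldl
    (fun (st : List Bool × List (Option Int)) r =>
      if st.1.getD r false then st
      else dfsLoopB G (n + (G.map List.length).sum + 1) [((r : Int), 0)] (st.1.set r true) st.2)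
    (List.replicate n false, List.replicate n none)
  st.2

-- ===== PRECONDITION & SPEC =====
-- Pre_DFS excludes exactly the inputs on which the Python A raises IndexError: a neighbour v outside
-- [-n, n) makes vertices[v] fail (every adjacency list is fully scanned, since every vertex is visited).
def Pre_DFS (G : List (List Int)) : Prop :=
  ∀ row ∈ G, ∀ v ∈ row, -(G.length : Int) ≤ v ∧ v < G.length
instance (G : List (List Int)) : Decidable (Pre_DFS G) := by unfold Pre_DFS; infer_instance

def pvWitness_DFS : List (List Int) := [[1, -2], [0]]

def Spec_DFS (G : List (List Int)) (out : List (Option Int)) : Prop := out = DFS_alt G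
instance (G : List (List Int)) (out : List (Option Int)) : Decidable (Spec_DFS G out) := by unfold Spec_DFS; infer_instance

-- ===== CLAIM (what is proved, stated in full; the proofs are below) =====
def Claim_equal_DFS : Prop := ∀ (G : List (List Int)), Dom_DFS G → Pre_DFS G → Spec_DFS G (DFS G)

-- ===== LEMMAS AND PROOFS =====

-- ---- small list lemmas ----
theorem pv_getD_map {α β : Type} (g : α → β) (d : α) :
    ∀ (l : List α) (i : Nat), (l.map g).getD i (g d) = g (l.getD i d) := by
  intro l
  induction l with
  | nil => intro i; simp [List.getD]
  | cons a t ih =>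
    intro i
    cases i with
    | zero => rfl
    | succ k => simp only [List.map_cons, List.getD_cons_succ]; exact ih k

theorem pv_set_getD_self {α : Type} :
    ∀ (l : List α) (i : Nat) (d : α), l.set i (l.getD i d) = l := by
  intro l
  induction l with
  | nil => intro i d; rfl
  | cons a t ih =>
    intro i d
    cases i with
    | zero => rfl
    | succ k => simp only [List.set_cons_succ, List.getD_cons_succ]; rw [ih]

theorem pv_map_set_eq {α β : Type} (l : List α) (i : Nat) (g : α → β) (d : α) (x : α)
    (hx : g x = g (l.getD i d)) : (l.set i x).map g = l.map g := by
  rw [List.map_set, hx, ← pv_getD_map g d l i]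
  exact pv_set_getD_self _ _ _

theorem pv_getD_set_self : ∀ (l : List Bool) (j : Nat) (b : Bool), j < l.length →
    (l.set j b).getD j false = b := by
  intro l
  induction l with
  | nil => intro j b h; simp at h
  | cons a t ih =>
    intro j b h
    cases j with
    | zero => rfl
    | succ k => simp only [List.set_cons_succ, List.getD_cons_succ]; exact ih k b (by simpa using h)

theorem pv_getD_set_ne : ∀ (l : List Bool) (i j : Nat) (b : Bool), i ≠ j →
    (l.set i b).getD j false = l.getD j false := by
  intro l
  induction l with
  | nil => intro i j b h; rfl
  | cons a t ih =>
    intro i j b h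
    cases i with
    | zero =>
      cases j with
      | zero => exact absurd rfl h
      | succ k => rfl
    | succ m =>
      cases j with
      | zero => rfl
      | succ k => simp only [List.set_cons_succ, List.getD_cons_succ]; exact ih m k b (by omega)

-- ---- visited count ----
def pvCnt : List Bool → Nat
  | [] => 0
  | b :: l => (if b then 0 else 1) + pvCnt l

theorem pvCnt_set_true_le : ∀ (l : List Bool) (i : Nat), pvCnt (l.set i true) ≤ pvCnt l := by
  intro l
  induction l with
  | nil => intro i; simp [pvCnt]
  | cons b t ih =>
    intro i
    cases i with
    | zero => cases b <;> simp [pvCnt]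
    | succ k => simp [pvCnt]; exact ih k

theorem pvCnt_set_true_lt : ∀ (l : List Bool) (i : Nat), i < l.length → l.getD i false = false →
    pvCnt (l.set i true) < pvCnt l := by
  intro l
  induction l with
  | nil => intro i h; simp at h
  | cons b t ih =>
    intro i hi hg
    cases i with
    | zero => simp [List.getD] at hg; subst hg; simp [pvCnt]
    | succ k =>
      simp at hi
      simp [List.getD] at hg
      have := ih k hi (by simpa [List.getD] using hg)
      simp [pvCnt]; omega

theorem pvCnt_le_length : ∀ (l : List Bool), pvCnt l ≤ l.length := by
  intro l
  induction l with
  | nil => simp [pvCnt]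
  | cons b t ih => simp [pvCnt]; split <;> omega

theorem pvCnt_pos (l : List Bool) (i : Nat) (h : i < l.length) (hg : l.getD i false = false) :
    1 ≤ pvCnt l := by
  have := pvCnt_set_true_lt l i h hg
  omega

-- ---- pvNorm facts ----
theorem pvNorm_lt (n : Nat) (v : Int) (h1 : -(n : Int) ≤ v) (h2 : v < n) : pvNorm n v < n := by
  unfold pvNorm; split <;> omega

theorem pvNorm_coe (n r : Nat) : pvNorm n (r : Int) = r := by
  unfold pvNorm; split <;> omega

-- ---- projection of A's vertex records onto the (visited, parent) state that B maintains ----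
def pvProj (vs : List PVVertex) : List Bool × List (Option Int) :=
  (vs.map (·.visited), vs.map (·.parent))

-- time-free reference version of A's recursion, on B's state representation
mutual
def refVisit (G : List (List Int)) : Nat → List Bool × List (Option Int) → Int → List Bool × List (Option Int)
  | 0, s, _ => s
  | f+1, s, u => refRow G f (s.1.set (pvNorm s.1.length u) true, s.2) u (G.getD (pvNorm G.length u) [])
termination_by f _ _ => (f, 0)

def refRow (G : List (List Int)) (f : Nat) : List Bool × List (Option Int) → Int → List Int → List Bool × List (Option Int)
  | s, _, [] => s
  | s, u, v :: l =>
    if s.1.getD (pvNorm s.1.length v) false then refRow G f s u l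
    else refRow G f (refVisit G f (s.1, s.2.set (pvNorm s.2.length v) (some u)) v) u l
termination_by _ _ l => (f, l.length + 1)
end

theorem pvProj_mark (vs : List PVVertex) (j : Nat) (t1 : Int) :
    pvProj (vs.set j ⟨true, (vs.getD j pvDefaultV).parent, some t1, (vs.getD j pvDefaultV).process⟩) =
      ((pvProj vs).1.set j true, (pvProj vs).2) := by
  unfold pvProj
  refine Prod.ext ?_ ?_
  · simp [List.map_set]
  · exact pv_map_set_eq vs j (fun x => x.parent) pvDefaultV _ rfl

theorem pvProj_process (vs : List PVVertex) (j : Nat) (t3 : Int) :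
    pvProj (vs.set j ⟨(vs.getD j pvDefaultV).visited, (vs.getD j pvDefaultV).parent,
        (vs.getD j pvDefaultV).entry, some t3⟩) = pvProj vs := by
  unfold pvProj
  refine Prod.ext ?_ ?_
  · exact pv_map_set_eq vs j (fun x => x.visited) pvDefaultV _ rfl
  · exact pv_map_set_eq vs j (fun x => x.parent) pvDefaultV _ rfl

theorem pvProj_parent (vs : List PVVertex) (j : Nat) (u : Int) :
    pvProj (vs.set j ⟨(vs.getD j pvDefaultV).visited, some u, (vs.getD j pvDefaultV).entry,
        (vs.getD j pvDefaultV).process⟩) =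
      ((pvProj vs).1, (pvProj vs).2.set j (some u)) := by
  unfold pvProj
  refine Prod.ext ?_ ?_
  · exact pv_map_set_eq vs j (fun x => x.visited) pvDefaultV _ rfl
  · simp [List.map_set]

theorem pvProj_getD_vis (vs : List PVVertex) (i : Nat) :
    (pvProj vs).1.getD i false = (vs.getD i pvDefaultV).visited :=
  pv_getD_map (fun x : PVVertex => x.visited) pvDefaultV vs i

theorem pvProj_len1 (vs : List PVVertex) : (pvProj vs).1.length = vs.length := by simp [pvProj]
theorem pvProj_len2 (vs : List PVVertex) : (pvProj vs).2.length = vs.length := by simp [pvProj]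

-- ---- erasure: the (visited, parent) projection of A's recursion is the reference recursion ----
theorem erase_row_of_visit (G : List (List Int)) (f : Nat)
    (hv : ∀ (vs : List PVVertex) (t u : Int),
        pvProj (dfsVisitA G f vs t u).1 = refVisit G f (pvProj vs) u) :
    ∀ (l : List Int) (vs : List PVVertex) (t u : Int),
      pvProj ((dfsRowA (fun vs' t' v => dfsVisitA G f vs' t' v) u vs t l).1) =
        refRow G f (pvProj vs) u l := by
  intro l
  induction l with
  | nil => intro vs t u; simp [dfsRowA, refRow]
  | cons v l ihl =>
    intro vs t u
    simp only [dfsRowA, refRow, pvProj_len1, pvProj_len2, pvProj_getD_vis]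
    by_cases hvis : (vs.getD (pvNorm vs.length v) pvDefaultV).visited = true
    · rw [if_pos hvis, if_pos hvis]
      exact ihl vs t u
    · rw [if_neg hvis, if_neg hvis, ihl, hv, pvProj_parent]

theorem erase_main (G : List (List Int)) : ∀ f : Nat,
    ∀ (vs : List PVVertex) (t u : Int),
      pvProj (dfsVisitA G f vs t u).1 = refVisit G f (pvProj vs) u := by
  intro f
  induction f with
  | zero => intro vs t u; simp [dfsVisitA, refVisit]
  | succ f ih =>
    intro vs t u
    simp only [dfsVisitA, refVisit]
    rw [pvProj_process, erase_row_of_visit G f ih, pvProj_mark, pvProj_len1]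

-- ---- monotonicity of the reference recursion ----
theorem ref_mono_row_of_visit (G : List (List Int)) (f : Nat)
    (hv : ∀ (s : List Bool × List (Option Int)) (u : Int),
        pvCnt (refVisit G f s u).1 ≤ pvCnt s.1 ∧
        (refVisit G f s u).1.length = s.1.length ∧ (refVisit G f s u).2.length = s.2.length) :
    ∀ (l : List Int) (s : List Bool × List (Option Int)) (u : Int),
      pvCnt (refRow G f s u l).1 ≤ pvCnt s.1 ∧
      (refRow G f s u l).1.length = s.1.length ∧ (refRow G f s u l).2.length = s.2.length := by
  intro l
  induction l with
  | nil => intro s u; simp [refRow]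
  | cons v l ihl =>
    intro s u
    simp only [refRow]
    split
    · exact ihl s u
    · have h1 := hv (s.1, s.2.set (pvNorm s.2.length v) (some u)) v
      have h2 := ihl (refVisit G f (s.1, s.2.set (pvNorm s.2.length v) (some u)) v) u
      simp only [List.length_set] at h1 h2 ⊢
      exact ⟨h2.1.trans h1.1, h2.2.1.trans h1.2.1, h2.2.2.trans h1.2.2⟩

theorem ref_mono (G : List (List Int)) : ∀ f : Nat,
    (∀ (s : List Bool × List (Option Int)) (u : Int),
        pvCnt (refVisit G f s u).1 ≤ pvCnt s.1 ∧
        (refVisit G f s u).1.length = s.1.length ∧ (refVisit G f s u).2.length = s.2.length) ∧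
    (∀ (l : List Int) (s : List Bool × List (Option Int)) (u : Int),
        pvCnt (refRow G f s u l).1 ≤ pvCnt s.1 ∧
        (refRow G f s u l).1.length = s.1.length ∧ (refRow G f s u l).2.length = s.2.length) := by
  intro f
  induction f with
  | zero =>
    have hv : ∀ (s : List Bool × List (Option Int)) (u : Int),
        pvCnt (refVisit G 0 s u).1 ≤ pvCnt s.1 ∧
        (refVisit G 0 s u).1.length = s.1.length ∧ (refVisit G 0 s u).2.length = s.2.length := by
      intro s u; simp [refVisit]
    exact ⟨hv, ref_mono_row_of_visit G 0 hv⟩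
  | succ f ih =>
    have hv : ∀ (s : List Bool × List (Option Int)) (u : Int),
        pvCnt (refVisit G (f+1) s u).1 ≤ pvCnt s.1 ∧
        (refVisit G (f+1) s u).1.length = s.1.length ∧ (refVisit G (f+1) s u).2.length = s.2.length := by
      intro s u
      simp only [refVisit]
      have h1 := ref_mono_row_of_visit G f ih.1
        (G.getD (pvNorm G.length u) []) (s.1.set (pvNorm s.1.length u) true, s.2) u
      simp only [List.length_set] at h1
      exact ⟨h1.1.trans (pvCnt_set_true_le s.1 _), h1.2.1, h1.2.2⟩
    exact ⟨hv, ref_mono_row_of_visit G (f+1) hv⟩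

-- ---- the potential that bounds the number of machine iterations ----
def pvMu (G : List (List Int)) (stk : List (Int × Nat)) : Nat :=
  stk.foldr (fun p acc => acc + 1 + ((G.getD (pvNorm G.length p.1) []).length - p.2)) 0

def pvRest (G : List (List Int)) (vis : List Bool) : Nat :=
  ∑ j ∈ Finset.range G.length, (if vis.getD j false then 0 else 1 + (G.getD j []).length)

def pvPhi (G : List (List Int)) (vis : List Bool) (stk : List (Int × Nat)) : Nat :=
  pvMu G stk + pvRest G vis

theorem pvMu_cons (G : List (List Int)) (u : Int) (i : Nat) (stk : List (Int × Nat)) :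
    pvMu G ((u, i) :: stk) = pvMu G stk + 1 + ((G.getD (pvNorm G.length u) []).length - i) := rfl

theorem pv_sum_getD_len : ∀ (G : List (List Int)),
    ∑ j ∈ Finset.range G.length, (G.getD j []).length = (G.map List.length).sum := by
  intro G
  induction G with
  | nil => simp
  | cons a t ih =>
    rw [List.length_cons, Finset.sum_range_succ']
    simp only [List.getD_cons_succ, List.getD_cons_zero, List.map_cons, List.sum_cons]
    omega

theorem pvRest_le (G : List (List Int)) (vis : List Bool) :
    pvRest G vis ≤ G.length + (G.map List.length).sum := by
  unfold pvRest
  calc ∑ j ∈ Finset.range G.length, (if vis.getD j false then 0 else 1 + (G.getD j []).length)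
      ≤ ∑ j ∈ Finset.range G.length, (1 + (G.getD j []).length) := by
        apply Finset.sum_le_sum
        intro j _
        split <;> omega
    _ = G.length + (G.map List.length).sum := by
        rw [Finset.sum_add_distrib, Finset.sum_const, Finset.card_range, smul_eq_mul, mul_one,
          pv_sum_getD_len]

theorem pvRest_set (G : List (List Int)) (vis : List Bool) (j : Nat)
    (hj : j < G.length) (hjv : j < vis.length) (hvis : vis.getD j false = false) :
    pvRest G (vis.set j true) + (1 + (G.getD j []).length) = pvRest G vis := by
  unfold pvRest
  have hmem : j ∈ Finset.range G.length := Finset.mem_range.mpr hj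
  rw [← Finset.add_sum_erase _ _ hmem, ← Finset.add_sum_erase _ _ hmem]
  rw [pv_getD_set_self vis j true hjv, hvis]
  have hsum : ∑ x ∈ (Finset.range G.length).erase j,
      (if (vis.set j true).getD x false then 0 else 1 + (G.getD x []).length) =
      ∑ x ∈ (Finset.range G.length).erase j,
      (if vis.getD x false then 0 else 1 + (G.getD x []).length) := by
    apply Finset.sum_congr rfl
    intro x hx
    rw [pv_getD_set_ne vis j x true (Finset.ne_of_mem_erase hx).symm]
  rw [hsum]
  simp
  omega

-- ---- fuel independence of the machine above the potential ----
theorem pv_fi (G : List (List Int)) : ∀ fb : Nat, ∀ (fb' : Nat) (stk : List (Int × Nat))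
    (vis : List Bool) (par : List (Option Int)),
    vis.length = G.length →
    pvPhi G vis stk < fb → pvPhi G vis stk < fb' →
    dfsLoopB G fb stk vis par = dfsLoopB G fb' stk vis par := by
  intro fb
  induction fb using Nat.strong_induction_on with
  | _ fb IH =>
  intro fb' stk vis par hlen h1 h2
  obtain ⟨a, rfl⟩ : ∃ a, fb = a + 1 := ⟨fb - 1, by omega⟩
  obtain ⟨b, rfl⟩ : ∃ b, fb' = b + 1 := ⟨fb' - 1, by omega⟩
  cases stk with
  | nil => rfl
  | cons p stk =>
    obtain ⟨u, i⟩ := p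
    have hmu := pvMu_cons G u i stk
    by_cases hi : i < (G.getD (pvNorm G.length u) []).length
    · by_cases hp : (pvNorm vis.length ((G.getD (pvNorm G.length u) []).getD i 0) < vis.length ∧
          vis.getD (pvNorm vis.length ((G.getD (pvNorm G.length u) []).getD i 0)) false = false)
      · -- push step
        simp only [dfsLoopB, if_pos hi, if_pos hp]
        have hset := pvRest_set G vis (pvNorm vis.length ((G.getD (pvNorm G.length u) []).getD i 0))
            (hlen ▸ hp.1) hp.1 hp.2
        have hphi : pvPhi G (vis.set (pvNorm vis.length ((G.getD (pvNorm G.length u) []).getD i 0)) true)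
            (((G.getD (pvNorm G.length u) []).getD i 0, 0) :: (u, i+1) :: stk) < pvPhi G vis ((u, i) :: stk) := by
          unfold pvPhi
          rw [pvMu_cons, pvMu_cons, pvMu_cons]
          have : pvNorm G.length ((G.getD (pvNorm G.length u) []).getD i 0) =
              pvNorm vis.length ((G.getD (pvNorm G.length u) []).getD i 0) := by rw [hlen]
          rw [this]
          omega
        exact IH a (by omega) b _ _ _ (by simpa using hlen) (by omega) (by omega)
      · -- advance step
        simp only [dfsLoopB, if_pos hi, if_neg hp]
        have hphi : pvPhi G vis ((u, i+1) :: stk) < pvPhi G vis ((u, i) :: stk) := by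
          unfold pvPhi
          rw [pvMu_cons, pvMu_cons]
          omega
        exact IH a (by omega) b _ _ _ hlen (by omega) (by omega)
    · -- pop step
      simp only [dfsLoopB, if_neg hi]
      have hphi : pvPhi G vis stk < pvPhi G vis ((u, i) :: stk) := by
        unfold pvPhi
        rw [pvMu_cons]
        omega
      exact IH a (by omega) b _ _ _ hlen (by omega) (by omega)

-- the machine as a fuel-free function of the state (always run with just enough fuel)
def machRun (G : List (List Int)) (stk : List (Int × Nat)) (vis : List Bool)
    (par : List (Option Int)) : List Bool × List (Option Int) :=
  dfsLoopB G (pvPhi G vis stk + 1) stk vis par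

theorem machRun_nil (G : List (List Int)) (vis : List Bool) (par : List (Option Int)) :
    machRun G [] vis par = (vis, par) := rfl

theorem machRun_pop (G : List (List Int)) (u : Int) (i : Nat) (stk : List (Int × Nat))
    (vis : List Bool) (par : List (Option Int)) (hlen : vis.length = G.length)
    (hi : ¬ i < (G.getD (pvNorm G.length u) []).length) :
    machRun G ((u, i) :: stk) vis par = machRun G stk vis par := by
  unfold machRun
  conv_lhs => rw [dfsLoopB]
  simp only [if_neg hi]
  apply pv_fi G _ _ _ _ _ hlen
  · unfold pvPhi; rw [pvMu_cons]; omega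
  · omega

theorem machRun_adv (G : List (List Int)) (u : Int) (i : Nat) (stk : List (Int × Nat))
    (vis : List Bool) (par : List (Option Int)) (hlen : vis.length = G.length)
    (hi : i < (G.getD (pvNorm G.length u) []).length)
    (hp : ¬ (pvNorm vis.length ((G.getD (pvNorm G.length u) []).getD i 0) < vis.length ∧
        vis.getD (pvNorm vis.length ((G.getD (pvNorm G.length u) []).getD i 0)) false = false)) :
    machRun G ((u, i) :: stk) vis par = machRun G ((u, i+1) :: stk) vis par := by
  unfold machRun
  conv_lhs => rw [dfsLoopB]
  simp only [if_pos hi, if_neg hp]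
  apply pv_fi G _ _ _ _ _ hlen
  · unfold pvPhi; rw [pvMu_cons, pvMu_cons]; omega
  · omega

theorem machRun_push (G : List (List Int)) (u : Int) (i : Nat) (stk : List (Int × Nat))
    (vis : List Bool) (par : List (Option Int)) (hlen : vis.length = G.length)
    (hi : i < (G.getD (pvNorm G.length u) []).length)
    (hp : pvNorm vis.length ((G.getD (pvNorm G.length u) []).getD i 0) < vis.length ∧
        vis.getD (pvNorm vis.length ((G.getD (pvNorm G.length u) []).getD i 0)) false = false) :
    machRun G ((u, i) :: stk) vis par =
      machRun G (((G.getD (pvNorm G.length u) []).getD i 0, 0) :: (u, i+1) :: stk)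
        (vis.set (pvNorm vis.length ((G.getD (pvNorm G.length u) []).getD i 0)) true)
        (par.set (pvNorm par.length ((G.getD (pvNorm G.length u) []).getD i 0)) (some u)) := by
  unfold machRun
  conv_lhs => rw [dfsLoopB]
  simp only [if_pos hi, if_pos hp]
  apply pv_fi G _ _ _ _ _ (by simpa using hlen)
  · have hset := pvRest_set G vis (pvNorm vis.length ((G.getD (pvNorm G.length u) []).getD i 0))
        (hlen ▸ hp.1) hp.1 hp.2
    unfold pvPhi
    rw [pvMu_cons, pvMu_cons, pvMu_cons]
    have : pvNorm G.length ((G.getD (pvNorm G.length u) []).getD i 0) =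
        pvNorm vis.length ((G.getD (pvNorm G.length u) []).getD i 0) := by rw [hlen]
    rw [this]
    omega
  · omega

-- ---- every neighbour list reachable through getD satisfies the Pre_DFS bounds ----
theorem pv_pre_row (G : List (List Int)) (hPre : Pre_DFS G) (u : Int) :
    ∀ v ∈ G.getD (pvNorm G.length u) [], -(G.length : Int) ≤ v ∧ v < G.length := by
  intro v hv
  by_cases h : pvNorm G.length u < G.length
  · have hmem : G.getD (pvNorm G.length u) [] ∈ G := by
      rw [List.getD_eq_getElem _ _ h]
      exact List.getElem_mem h
    exact hPre _ hmem v hv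
  · rw [List.getD_eq_default _ _ (not_lt.mp h)] at hv
    cases hv

-- ---- the stack machine simulates the reference recursion frame by frame ----
theorem sim (G : List (List Int)) (hPre : Pre_DFS G) :
    ∀ f : Nat, ∀ (u : Int) (l : List Int), ∀ (i : Nat) (stk : List (Int × Nat))
      (vis : List Bool) (par : List (Option Int)),
      (G.getD (pvNorm G.length u) []).drop i = l →
      vis.length = G.length → par.length = G.length → pvCnt vis ≤ f →
      machRun G ((u, i) :: stk) vis par =
        machRun G stk (refRow G f (vis, par) u l).1 (refRow G f (vis, par) u l).2 := by
  intro f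
  induction f using Nat.strong_induction_on with
  | _ f IHf =>
  intro u l
  induction l with
  | nil =>
    intro i stk vis par hdrop hlv hlp hcnt
    have hge : (G.getD (pvNorm G.length u) []).length ≤ i := List.drop_eq_nil_iff.mp hdrop
    rw [machRun_pop G u i stk vis par hlv (not_lt.mpr hge)]
    simp only [refRow]
  | cons v l ihl =>
    intro i stk vis par hdrop hlv hlp hcnt
    have hi : i < (G.getD (pvNorm G.length u) []).length := by
      by_contra h
      rw [List.drop_eq_nil_iff.mpr (not_lt.mp h)] at hdrop
      cases hdrop
    have hcons := List.drop_eq_getElem_cons hi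
    rw [hdrop] at hcons
    have hgv : (G.getD (pvNorm G.length u) []).getD i 0 = v := by
      rw [List.getD_eq_getElem _ _ hi]
      injection hcons with h1 h2
      exact h1.symm
    have hl : (G.getD (pvNorm G.length u) []).drop (i+1) = l := by
      injection hcons with h1 h2
      exact h2.symm
    have hmem : v ∈ G.getD (pvNorm G.length u) [] := by
      have := List.getElem_mem hi
      injection hcons with h1 h2
      rw [← h1] at this
      exact this
    have hb := pv_pre_row G hPre u v hmem
    have hjG : pvNorm G.length v < G.length := pvNorm_lt _ _ hb.1 hb.2
    have hnv : pvNorm vis.length v = pvNorm G.length v := by rw [hlv]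
    have hnp : pvNorm par.length v = pvNorm G.length v := by rw [hlp]
    by_cases hvis : vis.getD (pvNorm G.length v) false = false
    · -- v unvisited: the machine marks it, records its parent and pushes a frame for it
      have hjv : pvNorm G.length v < vis.length := by rw [hlv]; exact hjG
      rw [machRun_push G u i stk vis par hlv hi (by rw [hgv, hnv]; exact ⟨hjv, hvis⟩)]
      rw [hgv, hnv, hnp]
      have hone := pvCnt_pos vis (pvNorm G.length v) hjv hvis
      obtain ⟨g, rfl⟩ : ∃ g, f = g + 1 := ⟨f - 1, by omega⟩
      have hlt := pvCnt_set_true_lt vis (pvNorm G.length v) hjv hvis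
      have step1 := IHf g (by omega) v (G.getD (pvNorm G.length v) []) 0 ((u, i+1) :: stk)
          (vis.set (pvNorm G.length v) true) (par.set (pvNorm G.length v) (some u)) rfl
          (by simpa using hlv) (by simpa using hlp) (by omega)
      rw [step1]
      have hm := (ref_mono G g).2 (G.getD (pvNorm G.length v) [])
          (vis.set (pvNorm G.length v) true, par.set (pvNorm G.length v) (some u)) v
      simp only [List.length_set] at hm
      have step2 := ihl (i+1) stk
          (refRow G g (vis.set (pvNorm G.length v) true, par.set (pvNorm G.length v) (some u)) v
            (G.getD (pvNorm G.length v) [])).1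
          (refRow G g (vis.set (pvNorm G.length v) true, par.set (pvNorm G.length v) (some u)) v
            (G.getD (pvNorm G.length v) [])).2
          hl (by rw [hm.2.1, hlv]) (by rw [hm.2.2, hlp]) (by have := hm.1; omega)
      simp only [Prod.mk.eta] at step2
      rw [step2]
      simp only [refRow, refVisit, hnv, hnp, hvis, if_false, Bool.false_eq_true]
    · -- v already visited: the machine just advances the cursor
      have hvt : vis.getD (pvNorm G.length v) false = true := by
        cases h : vis.getD (pvNorm G.length v) false
        · exact absurd h hvis
        · rfl
      rw [machRun_adv G u i stk vis par hlv hi (by rw [hgv, hnv]; exact fun h => hvis h.2)]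
      rw [ihl (i+1) stk vis par hl hlv hlp hcnt]
      simp only [refRow, hnv, hvt, if_true]

-- ---- the two outer loops over the roots agree (through the pvProj projection) ----
theorem outer (G : List (List Int)) (hPre : Pre_DFS G) : ∀ (roots : List Nat),
    (∀ r ∈ roots, r < G.length) →
    ∀ (vs : List PVVertex) (t : Int) (vis : List Bool) (par : List (Option Int)),
      pvProj vs = (vis, par) → vs.length = G.length →
      pvProj (roots.foldl
          (fun (st : List PVVertex × Int) v =>
            if (st.1.getD v pvDefaultV).visited then st
            else dfsVisitA G G.length st.1 st.2 (v : Int)) (vs, t)).1 =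
        roots.foldl
          (fun (st : List Bool × List (Option Int)) r =>
            if st.1.getD r false then st
            else dfsLoopB G (G.length + (G.map List.length).sum + 1) [((r : Int), 0)]
              (st.1.set r true) st.2) (vis, par) := by
  intro roots
  induction roots with
  | nil =>
    intro _ vs t vis par hproj _
    simpa using hproj
  | cons r roots ih =>
    intro hr vs t vis par hproj hlen
    have h1 : (pvProj vs).1 = vis := by rw [hproj]
    have h2 : (pvProj vs).2 = par := by rw [hproj]
    have hlv : vis.length = G.length := by rw [← h1, pvProj_len1, hlen]
    have hlp : par.length = G.length := by rw [← h2, pvProj_len2, hlen]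
    have hvisr : (vs.getD r pvDefaultV).visited = vis.getD r false := by
      rw [← pvProj_getD_vis, h1]
    simp only [List.foldl_cons]
    by_cases hc : vis.getD r false = true
    · rw [if_pos (hvisr.trans hc), if_pos hc]
      exact ih (fun x hx => hr x (List.mem_cons_of_mem r hx)) vs t vis par hproj hlen
    · have hcf : vis.getD r false = false := by
        cases h : vis.getD r false
        · rfl
        · exact absurd h hc
      rw [if_neg (fun h => hc (hvisr.symm.trans h)), if_neg (fun h => hc h)]
      have hrlt : r < G.length := hr r List.mem_cons_self
      obtain ⟨m, hm⟩ : ∃ m, G.length = m + 1 := ⟨G.length - 1, by omega⟩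
      have hnc : pvNorm vis.length (r : Int) = r := pvNorm_coe _ r
      -- erase A's step to the reference recursion
      have herase := erase_main G G.length vs t (r : Int)
      rw [hproj] at herase
      rw [hm] at herase
      rw [refVisit] at herase
      rw [hnc] at herase
      -- convert B's fueled run on the root frame into machRun
      have hrv : r < vis.length := by omega
      have hsetrest := pvRest_set G vis r hrlt hrv hcf
      have hrle := pvRest_le G vis
      have hb2m : dfsLoopB G (G.length + (G.map List.length).sum + 1) [((r : Int), 0)]
          (vis.set r true) par = machRun G [((r : Int), 0)] (vis.set r true) par := by
        unfold machRun
        apply pv_fi G _ _ _ _ _ (by simpa using hlv)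
        · unfold pvPhi
          rw [pvMu_cons]
          have : pvNorm G.length (r : Int) = r := pvNorm_coe _ r
          rw [this]
          unfold pvMu
          simp only [List.foldr_nil]
          omega
        · omega
      -- run the machine on the root frame
      have hlt := pvCnt_set_true_lt vis r hrv hcf
      have hle := pvCnt_le_length vis
      have hsim := sim G hPre m (r : Int) (G.getD (pvNorm G.length (r : Int)) []) 0 []
          (vis.set r true) par rfl (by simpa using hlv) hlp (by omega)
      rw [machRun_nil] at hsim
      have hmono := (ref_mono G m).2 (G.getD (pvNorm G.length (r : Int)) []) (vis.set r true, par) (r : Int)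
      simp only [List.length_set] at hmono
      set s2 := refRow G m (vis.set r true, par) (r : Int) (G.getD (pvNorm G.length (r : Int)) []) with hs2
      have hproj' : pvProj (dfsVisitA G G.length vs t (r : Int)).1 = (s2.1, s2.2) := by
        rw [hm, herase]
      have hlen' : (dfsVisitA G G.length vs t (r : Int)).1.length = G.length := by
        rw [← pvProj_len1, hproj']
        show s2.1.length = G.length
        rw [hmono.2.1, hlv]
      rw [hb2m, hsim]
      exact ih (fun x hx => hr x (List.mem_cons_of_mem r hx)) _ _ _ _ hproj' hlen'

-- ===== VERDICT (by name: the statement is the Claim_ definition above) =====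
theorem DFS_spec : Claim_equal_DFS := by
  intro G _ hPre
  show DFS G = DFS_alt G
  simp only [DFS, DFS_alt]
  have h := outer G hPre (List.range G.length) (fun r hr => List.mem_range.mp hr)
      (List.replicate G.length pvDefaultV) 0 (List.replicate G.length false)
      (List.replicate G.length none) (by simp [pvProj, pvDefaultV]) (by simp)
  exact (congrArg Prod.snd h :)
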